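-- pv_equiv track=rewrite | github.com/AlexDevFull/SearchDuplicateApp | GUI_actions.py | counting_duplicates
-- ===== SOURCE A (Python) =====
-- def counting_duplicates(dic: dict) -> int:
--     dup_count = []
--     for i in dic.values():
--         if len(i) != 1:
--             for item in i:
--                 dup_count.append(item)
--         else:
--             dup_count.append(i)
--     return len(dup_count)
-- ===== SOURCE B (Python) =====
-- def counting_duplicates(dic: dict) -> int:
--     return sum(len(i) for i in dic.values())
-- ===== Notes on version B (the rewrite author's own statement) =====
-- stated objective: simpler
-- what changed: Replaces the nested loop that materializes a flat list (with an if/else branch for singleton values) by a single sum of len(i) over the values, using the fact that the len==1 branch contributes exactly 1 == len(i).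
import Mathlib
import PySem

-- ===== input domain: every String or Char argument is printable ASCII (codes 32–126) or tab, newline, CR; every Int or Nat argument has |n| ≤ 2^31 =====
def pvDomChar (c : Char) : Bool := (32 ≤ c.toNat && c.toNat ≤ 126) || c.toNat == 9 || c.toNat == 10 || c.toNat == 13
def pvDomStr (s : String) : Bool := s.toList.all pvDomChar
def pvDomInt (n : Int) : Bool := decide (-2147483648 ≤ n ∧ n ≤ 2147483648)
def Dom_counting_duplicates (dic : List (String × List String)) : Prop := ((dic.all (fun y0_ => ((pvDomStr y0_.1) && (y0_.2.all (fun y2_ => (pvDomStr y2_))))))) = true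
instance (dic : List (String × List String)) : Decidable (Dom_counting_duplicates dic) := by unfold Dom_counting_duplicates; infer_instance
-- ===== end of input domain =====

-- B replaces A's nested list-building loop with a single sum of per-value lengths (simpler).


-- ===== PORT A =====
-- A builds a heterogeneous list (items or the singleton list itself) and returns its length.
def counting_duplicates (dic : List (String × List String)) : Int :=
  let dup_count : List (String ⊕ List String) :=
    dic.foldl (fun acc kv =>
      if kv.2.length ≠ 1 then acc ++ kv.2.map Sum.inl
      else acc ++ [Sum.inr kv.2]) []
  (dup_count.length : Int)

-- ===== PORT B =====
-- B: single aggregation pass, sum of len over the values (simpler decomposition).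
def counting_duplicates_alt (dic : List (String × List String)) : Int :=
  (dic.map (fun kv => (kv.2.length : Int))).sum

-- ===== PRECONDITION & SPEC =====
def Spec_counting_duplicates (dic : List (String × List String)) (out : Int) : Prop := out = counting_duplicates_alt dic
instance (dic : List (String × List String)) (out : Int) : Decidable (Spec_counting_duplicates dic out) := by unfold Spec_counting_duplicates; infer_instance

-- ===== CLAIM (what is proved, stated in full; the proofs are below) =====
def Claim_equal_counting_duplicates : Prop := ∀ (dic : List (String × List String)), Dom_counting_duplicates dic → Spec_counting_duplicates dic (counting_duplicates dic)

-- ===== LEMMAS AND PROOFS =====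

-- ===== VERDICT (by name: the statement is the Claim_ definition above) =====
lemma cd_foldl_len (dic : List (String × List String)) (acc : List (String ⊕ List String)) :
    ((dic.foldl (fun acc kv =>
      if kv.2.length ≠ 1 then acc ++ kv.2.map Sum.inl
      else acc ++ [Sum.inr kv.2]) acc).length : Int)
      = (acc.length : Int) + (dic.map (fun kv => (kv.2.length : Int))).sum := by
  induction dic generalizing acc with
  | nil => simp
  | cons kv t ih =>
    simp only [List.foldl_cons, List.map_cons, List.sum_cons]
    by_cases h : kv.2.length ≠ 1
    · rw [if_pos h, ih]; simp; ring
    · rw [if_neg h, ih]; push Not at h; simp [h]; ring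

theorem counting_duplicates_spec : Claim_equal_counting_duplicates := by
  intro dic _
  unfold Spec_counting_duplicates counting_duplicates counting_duplicates_alt
  simpa using cd_foldl_len dic []
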